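-- pv_equiv track=rewrite | github.com/Don1013/AtCoder | ABC-002-D.py | check_connection
-- ===== SOURCE A (Python) =====
-- def check_connection(habatsu, R):
--     if len(habatsu) == 0:
--         return False
--     elif len(habatsu) == 1:
--         return True
--     need = [[habatsu[i], habatsu[j]]
--             for i in range(len(habatsu)-1) for j in range(i+1, len(habatsu))]
--
--     for i in range(len(need)):
--         if need[i] in R:
--             pass
--         else:
--             return False
--     return True
-- ===== SOURCE B (Python) =====
-- def check_connection(habatsu, R):
--     if len(habatsu) == 0:
--         return False
--     if len(habatsu) == 1:
--         return True
--     adj = {}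
--     for e in R:
--         if len(e) == 2:
--             s = adj.get(e[0], set())
--             s.add(e[1])
--             adj[e[0]] = s
--     rest = habatsu
--     while rest:
--         x, rest = rest[0], rest[1:]
--         if not set(rest) <= adj.get(x, set()):
--             return False
--     return True
-- ===== Notes on version B (the rewrite author's own statement) =====
-- stated objective: faster
-- what changed: Replaces the materialised quadratic list of all ordered pairs with repeated list-membership scans of R by a directed adjacency index (dict of sets) built once from R, followed by one subset test per source element.
import Mathlib
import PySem

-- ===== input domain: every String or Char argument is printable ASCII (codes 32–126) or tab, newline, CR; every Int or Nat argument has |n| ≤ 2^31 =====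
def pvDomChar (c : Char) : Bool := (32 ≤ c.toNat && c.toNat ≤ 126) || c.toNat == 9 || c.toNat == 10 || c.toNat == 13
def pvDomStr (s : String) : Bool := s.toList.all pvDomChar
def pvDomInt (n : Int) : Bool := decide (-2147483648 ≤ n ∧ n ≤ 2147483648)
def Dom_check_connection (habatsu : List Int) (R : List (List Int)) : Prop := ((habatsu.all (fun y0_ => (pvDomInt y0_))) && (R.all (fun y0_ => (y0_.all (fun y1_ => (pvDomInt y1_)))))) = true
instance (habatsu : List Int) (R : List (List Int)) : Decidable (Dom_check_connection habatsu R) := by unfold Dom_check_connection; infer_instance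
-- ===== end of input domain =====

-- ===== PORT A =====
-- B differs from A: adjacency index + per-source subset test instead of enumerating all pairs (objective: faster).
-- loop 'for i in range(len(need)): if need[i] in R: pass else: return False' as structural recursion over need
def pvLoopA (need : List (List Int)) (R : List (List Int)) : Bool :=
  match need with
  | [] => true
  | p :: rest => if p ∈ R then pvLoopA rest R else false

def check_connection (habatsu : List Int) (R : List (List Int)) : Bool :=
  if habatsu.length == 0 then false
  else if habatsu.length == 1 then true
  else
    -- need = [[habatsu[i], habatsu[j]] for i in range(len(habatsu)-1) for j in range(i+1, len(habatsu))]
    -- indices i, j are always in range here, so pyGetD (default 0) is exact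
    let need := (PySem.List.pyRange 0 ((habatsu.length : Int) - 1) 1).flatMap (fun i =>
      (PySem.List.pyRange (i + 1) (habatsu.length : Int) 1).map (fun j =>
        [PySem.List.pyGetD habatsu i 0, PySem.List.pyGetD habatsu j 0]))
    pvLoopA need R

-- ===== PORT B =====
-- for e in R: if len(e) == 2: s = adj.get(e[0], set()); s.add(e[1]); adj[e[0]] = s
def pvAdj (R : List (List Int)) : PySem.Dict Int (PySem.Set Int) :=
  R.foldl (fun adj e =>
    match e with
    | [a, b] => adj.insert a (PySem.Set.add (adj.getD a PySem.Set.empty) b)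
    | _ => adj) PySem.Dict.empty

-- while rest: x, rest = rest[0], rest[1:]; if not set(rest) <= adj.get(x, set()): return False
def pvLoopB (rest : List Int) (adj : PySem.Dict Int (PySem.Set Int)) : Bool :=
  match rest with
  | [] => true
  | x :: rest =>
    if PySem.Set.issubset (PySem.Set.ofList rest) (adj.getD x PySem.Set.empty)
    then pvLoopB rest adj
    else false

def check_connection_alt (habatsu : List Int) (R : List (List Int)) : Bool :=
  if habatsu.length == 0 then false
  else if habatsu.length == 1 then true
  else pvLoopB habatsu (pvAdj R)

-- ===== PRECONDITION & SPEC =====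
def Spec_check_connection (habatsu : List Int) (R : List (List Int)) (out : Bool) : Prop := out = check_connection_alt habatsu R
instance (habatsu : List Int) (R : List (List Int)) (out : Bool) : Decidable (Spec_check_connection habatsu R out) := by unfold Spec_check_connection; infer_instance

-- ===== CLAIM (what is proved, stated in full; the proofs are below) =====
def Claim_equal_check_connection : Prop := ∀ (habatsu : List Int) (R : List (List Int)), Dom_check_connection habatsu R → Spec_check_connection habatsu R (check_connection habatsu R)

-- ===== LEMMAS AND PROOFS =====

lemma pvLoopA_iff (need R : List (List Int)) : pvLoopA need R = true ↔ ∀ p ∈ need, p ∈ R := by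
  induction need with
  | nil => simp [pvLoopA]
  | cons p rest ih =>
    simp only [pvLoopA]
    split_ifs with h <;> simp [h, ih]

lemma pvAdj_fold (R : List (List Int)) (adj : PySem.Dict Int (PySem.Set Int)) (a b : Int) :
    b ∈ (R.foldl (fun adj e =>
      match e with
      | [a, b] => adj.insert a (PySem.Set.add (adj.getD a PySem.Set.empty) b)
      | _ => adj) adj).getD a PySem.Set.empty ↔ b ∈ adj.getD a PySem.Set.empty ∨ [a, b] ∈ R := by
  induction R generalizing adj with
  | nil => simp
  | cons e R ih =>
    rcases e with _ | ⟨p, _ | ⟨q, _ | ⟨r, t⟩⟩⟩ <;>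
      simp only [List.foldl_cons, ih, List.mem_cons] <;>
      [skip; skip; rw [PySem.Dict.getD_insert]; skip] <;>
      try { constructor <;> { rintro (h | h) <;> simp_all } }
    split_ifs with hp
    · subst hp
      rw [PySem.Set.mem_add]
      constructor
      · rintro ((h | h) | h) <;> simp_all
      · rintro (h | h | h) <;> simp_all
    · constructor
      · rintro (h | h) <;> simp_all
      · rintro (h | h | h) <;> simp_all

lemma pvAdj_mem (R : List (List Int)) (a b : Int) :
    b ∈ (pvAdj R).getD a PySem.Set.empty ↔ [a, b] ∈ R := by
  rw [pvAdj, pvAdj_fold]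
  simp [PySem.Dict.getD_empty, PySem.Set.empty]

lemma pvLoopB_iff (h : List Int) (adj : PySem.Dict Int (PySem.Set Int)) :
    pvLoopB h adj = true ↔ h.Pairwise (fun x y => y ∈ adj.getD x PySem.Set.empty) := by
  induction h with
  | nil => simp [pvLoopB]
  | cons x rest ih =>
    simp only [pvLoopB, List.pairwise_cons]
    split_ifs with hs
    · rw [ih]
      have hs' := (PySem.Set.issubset_iff _ _).mp hs
      simp only [PySem.Set.mem_ofList] at hs'
      tauto
    · simp only [false_iff, not_and]
      intro hall
      exact absurd ((PySem.Set.issubset_iff _ _).mpr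
        (fun y hy => hall y ((PySem.Set.mem_ofList _ _).mp hy))) hs

-- A's pair list checked against R, expressed as a Pairwise statement over habatsu
lemma needA_iff (h : List Int) (R : List (List Int)) :
    (∀ p ∈ (PySem.List.pyRange 0 ((h.length : Int) - 1) 1).flatMap (fun i =>
      (PySem.List.pyRange (i + 1) (h.length : Int) 1).map (fun j =>
        [PySem.List.pyGetD h i 0, PySem.List.pyGetD h j 0])), p ∈ R) ↔
    h.Pairwise (fun x y => [x, y] ∈ R) := by
  rw [List.pairwise_iff_getElem]
  simp only [List.mem_flatMap, List.mem_map, PySem.List.mem_pyRange_one]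
  constructor
  · intro hA i j hi hj hij
    exact hA [h[i], h[j]] ⟨(i : Int), ⟨by omega, by omega⟩, (j : Int), ⟨by omega, by omega⟩, by
      rw [PySem.List.pyGetD_eq_getElem h 0 (by omega) (by exact_mod_cast hi),
          PySem.List.pyGetD_eq_getElem h 0 (by omega) (by exact_mod_cast hj)]
      simp⟩
  · rintro hP p ⟨i, ⟨hi0, hi1⟩, j, ⟨hj0, hj1⟩, rfl⟩
    rw [PySem.List.pyGetD_eq_getElem h 0 hi0 (by omega),
        PySem.List.pyGetD_eq_getElem h 0 (by omega) (by omega)]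
    exact hP i.toNat j.toNat (by omega) (by omega) (by omega)

-- ===== VERDICT (by name: the statement is the Claim_ definition above) =====
theorem check_connection_spec : Claim_equal_check_connection := by
  intro h R _
  unfold Spec_check_connection check_connection check_connection_alt
  by_cases h0 : h.length = 0
  · simp [h0]
  · by_cases h1 : h.length = 1
    · simp [h1]
    · simp only [beq_iff_eq, h0, h1, if_false]
      rw [Bool.eq_iff_iff, pvLoopA_iff, pvLoopB_iff, needA_iff]
      simp only [pvAdj_mem]
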